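-- pv_equiv track=rewrite | github.com/fishlips13/AoC | AoC-16/11-bad.py | build_state
-- ===== SOURCE A (Python) =====
-- def build_state(floors):
--     state = ""
--     for floor in floors:
--
--         part_types = {}
--         for item in floor:
--             if item[0] not in part_types:
--                 part_types[item[0]] = []
--             part_types[item[0]].append(item)
--
--         floor_list = []
--         for parts in part_types.values():
--             if len(parts) == 2:
--                 floor_list.append("RTGCHP")
--             else:
--                 floor_list.extend([i[0] + "-" + i[1] for i in parts])
--
--         floor_list.sort()
--         state += ",".join(floor_list) + ";"
--     return state
-- ===== SOURCE B (Python) =====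
-- def build_state(floors):
--     # sort each floor by item type, scan runs of equal first component; final sort of
--     # floor_list makes group order irrelevant, so output matches the dict-grouping original.
--     state_parts = []
--     for floor in floors:
--         srt = sorted(floor, key=lambda it: it[0])
--         floor_list = []
--         while srt:
--             k = srt[0][0]
--             j = 0
--             while j < len(srt) and srt[j][0] == k:
--                 j += 1
--             g, srt = srt[:j], srt[j:]
--             if len(g) == 2:
--                 floor_list.append("RTGCHP")
--             else:
--                 floor_list += [a + "-" + b for a, b in g]
--         state_parts.append(",".join(sorted(floor_list)) + ";")
--     return "".join(state_parts)
-- ===== Notes on version B (the rewrite author's own statement) =====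
-- stated objective: idiomatic
-- what changed: B replaces A's dict-of-groups accumulation with sort-by-type followed by a run scan over the sorted floor, and builds the state with ''.join of per-floor strings instead of string +=; the final sort of floor_list makes group order irrelevant, so the output is identical.
import Mathlib
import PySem

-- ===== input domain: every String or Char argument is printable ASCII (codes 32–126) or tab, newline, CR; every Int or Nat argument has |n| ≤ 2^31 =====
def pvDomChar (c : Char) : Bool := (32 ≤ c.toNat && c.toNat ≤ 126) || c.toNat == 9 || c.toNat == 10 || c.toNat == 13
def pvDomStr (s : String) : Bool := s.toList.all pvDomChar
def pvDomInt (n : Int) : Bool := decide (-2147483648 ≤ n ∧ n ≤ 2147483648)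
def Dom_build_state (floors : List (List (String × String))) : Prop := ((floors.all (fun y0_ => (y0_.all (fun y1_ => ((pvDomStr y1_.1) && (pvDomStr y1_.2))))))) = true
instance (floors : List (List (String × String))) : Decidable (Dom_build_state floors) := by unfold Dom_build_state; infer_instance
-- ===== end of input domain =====

-- B sorts each floor by item type and scans runs of equal keys instead of accumulating a
-- dict of groups (idiomatic sort+group; the final sort of floor_list makes group order irrelevant).

-- ===== PORT A =====
def build_state (floors : List (List (String × String))) : String :=
  floors.foldl (fun state floor =>
    -- part_types = {}; for item in floor: if item[0] not in part_types: ...[]; then append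
    let part_types : PySem.Dict String (List (String × String)) :=
      floor.foldl (fun d item =>
        let d := if d.contains item.1 then d else d.insert item.1 []
        d.insert item.1 (d.getD item.1 [] ++ [item])) PySem.Dict.empty
    -- floor_list accumulation over part_types.values()
    let floor_list : List String :=
      part_types.values.foldl (fun fl parts =>
        if parts.length == 2 then fl ++ ["RTGCHP"]
        else fl ++ parts.map (fun i => i.1 ++ "-" ++ i.2)) []
    let floor_list := PySem.List.sorted floor_list (fun x => x)
    state ++ PySem.Str.join "," floor_list ++ ";") ""

-- ===== PORT B =====
-- B's while-loop over the sorted floor: peel the run of the leading key, emit its part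
def pvRuns_build_state : List (String × String) → List String
  | [] => []
  | it :: rest =>
    let g := (it :: rest).takeWhile (fun x => x.1 == it.1)
    let srt' := (it :: rest).dropWhile (fun x => x.1 == it.1)
    (if g.length == 2 then ["RTGCHP"] else g.map (fun p => p.1 ++ "-" ++ p.2))
      ++ pvRuns_build_state srt'
  termination_by l => l.length
  decreasing_by
    simp only [List.dropWhile_cons, beq_self_eq_true, if_true]
    exact Nat.lt_succ_of_le (List.length_dropWhile_le _ rest)

def build_state_alt (floors : List (List (String × String))) : String :=
  PySem.Str.join "" (floors.map (fun floor =>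
    let srt := PySem.List.sorted floor (fun it => it.1)
    let floor_list := pvRuns_build_state srt
    PySem.Str.join "," (PySem.List.sorted floor_list (fun x => x)) ++ ";"))

-- ===== PRECONDITION & SPEC =====
def Spec_build_state (floors : List (List (String × String))) (out : String) : Prop := out = build_state_alt floors
instance (floors : List (List (String × String))) (out : String) : Decidable (Spec_build_state floors out) := by unfold Spec_build_state; infer_instance

-- ===== CLAIM (what is proved, stated in full; the proofs are below) =====
def Claim_equal_build_state : Prop := ∀ (floors : List (List (String × String))), Dom_build_state floors → Spec_build_state floors (build_state floors)

-- ===== LEMMAS AND PROOFS =====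

-- the contribution of one type-group to floor_list
def pvContrib (g : List (String × String)) : List String :=
  if g.length == 2 then ["RTGCHP"] else g.map (fun p => p.1 ++ "-" ++ p.2)

theorem pvContrib_perm {g₁ g₂ : List (String × String)} (h : g₁.Perm g₂) :
    (pvContrib g₁).Perm (pvContrib g₂) := by
  unfold pvContrib
  rw [h.length_eq]
  by_cases h2 : g₂.length == 2
  · simp [h2]
  · simp only [h2, Bool.false_eq_true, if_false]
    exact h.map _

-- A's dict step is a single modify step
theorem pvStepA (d : PySem.Dict String (List (String × String))) (item : String × String) :
    (let d' := if d.contains item.1 then d else d.insert item.1 []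
     d'.insert item.1 (d'.getD item.1 [] ++ [item]))
    = d.insert item.1 (d.getD item.1 [] ++ [item]) := by
  by_cases h : d.contains item.1
  · simp [h]
  · rw [eq_false_of_ne_true h]
    simp only [Bool.false_eq_true, if_false, PySem.Dict.getD_insert_self,
      PySem.Dict.insert_insert_self, List.nil_append]
    rw [PySem.Dict.getD_of_not_contains d [] (eq_false_of_ne_true h)]
    simp

-- A's floor_list (before sorting) as a flatMap over the distinct keys in appearance order
theorem pvFloorListA (floor : List (String × String)) :
    (((floor.foldl (fun d item =>
        let d := if d.contains item.1 then d else d.insert item.1 []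
        d.insert item.1 (d.getD item.1 [] ++ [item]))
        (PySem.Dict.empty : PySem.Dict String (List (String × String)))).values).foldl
      (fun fl parts =>
        if parts.length == 2 then fl ++ ["RTGCHP"]
        else fl ++ parts.map (fun i => i.1 ++ "-" ++ i.2)) [])
    = (PySem.Set.ofList (floor.map (fun it => it.1))).flatMap
        (fun k => pvContrib (floor.filter (fun it => it.1 == k))) := by
  have hstep : (fun (d : PySem.Dict String (List (String × String))) (item : String × String) =>
      let d := if d.contains item.1 then d else d.insert item.1 []
      d.insert item.1 (d.getD item.1 [] ++ [item]))
      = fun d item => d.modify item.1 [] (fun l => l ++ [item]) := by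
    funext d item
    exact pvStepA d item
  rw [hstep]
  set D := floor.foldl (fun d item => d.modify item.1 [] (fun l => l ++ [item]))
      (PySem.Dict.empty : PySem.Dict String (List (String × String))) with hD
  have hDmap : D = (floor.map (fun it => (it.1, it))).foldl
      (fun d p => d.modify p.1 [] (fun l => l ++ [p.2]))
      (PySem.Dict.empty : PySem.Dict String (List (String × String))) := by
    rw [List.foldl_map]
  have hkeys : D.keys = PySem.Set.ofList (floor.map (fun it => it.1)) := by
    rw [hD, PySem.Dict.keys_foldl_modify_key floor (fun it => it.1) [] (fun _ x => (fun l => l ++ [x]))]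
    simp [PySem.Dict.empty, PySem.Dict.keys, PySem.Set.update_nil_left]
  have hnd : D.keys.Nodup := by
    rw [hD]
    apply PySem.Dict.nodup_keys_foldl_modify_key floor (fun it => it.1) [] (fun _ x => (fun l => l ++ [x]))
    simp [PySem.Dict.empty, PySem.Dict.keys]
  have hget : ∀ k, D.getD k [] = floor.filter (fun it => it.1 == k) := by
    intro k
    rw [hDmap, PySem.Dict.getD_foldl_modify_append]
    simp only [List.filter_map, List.map_map, Function.comp_def]
    simp [PySem.Dict.empty, PySem.Dict.getD, PySem.Dict.get?]
  have hvals : D.values = D.keys.map (fun k => D.getD k []) :=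
    PySem.Dict.values_eq_map_keys D hnd []
  have hfl : (fun (fl : List String) (parts : List (String × String)) =>
      if parts.length == 2 then fl ++ ["RTGCHP"]
      else fl ++ parts.map (fun i => i.1 ++ "-" ++ i.2))
      = fun fl parts => fl ++ pvContrib parts := by
    funext fl parts
    unfold pvContrib
    split <;> rfl
  rw [hfl, PySem.List.foldl_append_eq_flatMap, hvals, List.flatMap_map, hkeys]
  simp only [List.nil_append]
  congr 1
  funext k
  rw [hget k]

-- on a key-sorted list, the leading run is exactly the filter at the head key
theorem pvTakeDrop (l : List (String × String)) (k₀ : String)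
    (hp : l.Pairwise (fun a b => a.1 ≤ b.1)) (hk : ∀ y ∈ l, k₀ ≤ y.1) :
    l.takeWhile (fun x => x.1 == k₀) = l.filter (fun x => x.1 == k₀)
    ∧ l.dropWhile (fun x => x.1 == k₀) = l.filter (fun x => !(x.1 == k₀)) := by
  induction l with
  | nil => simp
  | cons x xs ih =>
    rcases List.pairwise_cons.mp hp with ⟨hx, hxs⟩
    by_cases hx0 : x.1 == k₀
    · have := ih hxs (fun y hy => hk y (List.mem_cons_of_mem x hy))
      simp [hx0, this.1, this.2]
    · have hlt : k₀ < x.1 := lt_of_le_of_ne (hk x (List.mem_cons_self ..)) (fun h => hx0 (by simp [h.symm]))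
      have hnone : ∀ y ∈ xs, ¬ (y.1 == k₀) = true := by
        intro y hy h
        have : x.1 ≤ y.1 := hx y hy
        have : k₀ < y.1 := lt_of_lt_of_le hlt this
        simp only [beq_iff_eq] at h
        exact absurd h (ne_of_gt this)
      constructor
      · simp only [List.takeWhile_cons, Bool.false_eq_true, if_false, List.filter_cons, hx0]
        rw [List.filter_eq_nil_iff.mpr hnone]
      · simp only [List.dropWhile_cons, hx0, Bool.false_eq_true, if_false, List.filter_cons]
        simp only [Bool.not_false, if_true]
        congr 1
        symm
        apply List.filter_eq_self.mpr
        intro y hy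
        simp [hnone y hy]

-- B's runs scan, characterised: a Nodup key list covering the keys, same flatMap shape
theorem pvRunsSpecAux : ∀ (n : Nat) (srt : List (String × String)), srt.length ≤ n →
    srt.Pairwise (fun a b => a.1 ≤ b.1) →
    ∃ ks : List String, ks.Nodup ∧ (∀ k, k ∈ ks ↔ k ∈ srt.map (fun it => it.1)) ∧
      pvRuns_build_state srt
        = ks.flatMap (fun k => pvContrib (srt.filter (fun it => it.1 == k))) := by
  intro n
  induction n with
  | zero =>
    intro srt hlen _
    have : srt = [] := List.eq_nil_of_length_eq_zero (Nat.le_zero.mp hlen)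
    subst this
    exact ⟨[], by simp [pvRuns_build_state]⟩
  | succ n ih =>
    intro srt hlen hp
    match srt with
    | [] => exact ⟨[], by simp [pvRuns_build_state]⟩
    | it :: rest =>
      rcases List.pairwise_cons.mp hp with ⟨hx, hxs⟩
      have hkmin : ∀ y ∈ it :: rest, it.1 ≤ y.1 := by
        intro y hy
        rcases List.mem_cons.mp hy with h | h
        · exact le_of_eq (by rw [h])
        · exact hx y h
      have htd := pvTakeDrop (it :: rest) it.1 hp hkmin
      set g := (it :: rest).takeWhile (fun x => x.1 == it.1) with hgdef
      set srt' := (it :: rest).dropWhile (fun x => x.1 == it.1) with hsdef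
      have hg : g = (it :: rest).filter (fun x => x.1 == it.1) := htd.1
      have hsrt' : srt' = (it :: rest).filter (fun x => !(x.1 == it.1)) := htd.2
      have hlen' : srt'.length ≤ n := by
        have : srt' = rest.dropWhile (fun x => x.1 == it.1) := by
          rw [hsdef, List.dropWhile_cons]
          simp
        rw [this]
        exact Nat.le_of_lt_succ (Nat.lt_succ_of_le (Nat.le_trans (List.length_dropWhile_le _ rest) (Nat.le_of_succ_le_succ hlen)))
      have hp' : srt'.Pairwise (fun a b => a.1 ≤ b.1) := by
        rw [hsrt']; exact hp.filter _
      rcases ih srt' hlen' hp' with ⟨ks, hnd, hmem, heq⟩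
      have hk0 : it.1 ∉ ks := by
        intro h
        rcases List.mem_map.mp ((hmem it.1).mp h) with ⟨y, hy, hyk⟩
        rw [hsrt'] at hy
        rcases List.mem_filter.mp hy with ⟨_, hne⟩
        simp [hyk] at hne
      refine ⟨it.1 :: ks, List.nodup_cons.mpr ⟨hk0, hnd⟩, ?_, ?_⟩
      · intro k
        simp only [List.mem_cons, hmem k, hsrt', List.mem_map]
        constructor
        · rintro (h | h)
          · exact ⟨it, Or.inl rfl, h.symm⟩
          · rcases h with ⟨y, hy, hyk⟩
            exact ⟨y, List.mem_cons.mp (List.mem_filter.mp hy).1, hyk⟩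
        · rintro ⟨y, hy, hyk⟩
          by_cases hky : k = it.1
          · exact Or.inl hky
          · refine Or.inr ⟨y, List.mem_filter.mpr ⟨List.mem_cons.mpr hy, ?_⟩, hyk⟩
            simp [hyk, hky]
      · rw [pvRuns_build_state]
        show (if g.length == 2 then ["RTGCHP"] else g.map (fun p => p.1 ++ "-" ++ p.2))
            ++ pvRuns_build_state srt' = _
        rw [List.flatMap_cons, heq, hg]
        congr 1
        apply List.flatMap_congr
        intro k hk
        congr 1
        rw [hsrt', List.filter_filter]
        apply List.filter_congr
        intro y hy
        by_cases hyk : y.1 = k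
        · have : k ≠ it.1 := by
            intro h; exact hk0 (h ▸ hk)
          simp [hyk, this]
        · simp [hyk]

theorem pvRunsSpec (srt : List (String × String))
    (hp : srt.Pairwise (fun a b => a.1 ≤ b.1)) :
    ∃ ks : List String, ks.Nodup ∧ (∀ k, k ∈ ks ↔ k ∈ srt.map (fun it => it.1)) ∧
      pvRuns_build_state srt
        = ks.flatMap (fun k => pvContrib (srt.filter (fun it => it.1 == k))) :=
  pvRunsSpecAux srt.length srt (Nat.le_refl _) hp

-- the two floor_lists are permutations, hence equal after sorting
theorem pvFloorSortedEq (floor : List (String × String)) :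
    PySem.List.sorted (((floor.foldl (fun d item =>
        let d := if d.contains item.1 then d else d.insert item.1 []
        d.insert item.1 (d.getD item.1 [] ++ [item]))
        (PySem.Dict.empty : PySem.Dict String (List (String × String)))).values).foldl
      (fun fl parts =>
        if parts.length == 2 then fl ++ ["RTGCHP"]
        else fl ++ parts.map (fun i => i.1 ++ "-" ++ i.2)) []) (fun x => x)
    = PySem.List.sorted (pvRuns_build_state (PySem.List.sorted floor (fun it => it.1))) (fun x => x) := by
  obtain ⟨ks, hnd, hmem, heq⟩ :=
    pvRunsSpec (PySem.List.sorted floor (fun it => it.1))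
      (PySem.List.sorted_pairwise floor (fun it => it.1))
  rw [pvFloorListA, heq]
  apply PySem.List.sorted_eq_sorted_of_perm _ _ _ (fun a b h => h)
  apply List.Perm.flatMap
  · rw [List.perm_ext_iff_of_nodup (PySem.Set.nodup_ofList _) hnd]
    intro k
    rw [PySem.Set.mem_ofList, hmem k]
    have hperm : (PySem.List.sorted floor (fun it => it.1)).Perm floor :=
      PySem.List.sorted_perm floor (fun it => it.1) false
    constructor
    · intro h
      exact (hperm.map (fun it => it.1)).mem_iff.mpr h
    · intro h
      exact (hperm.map (fun it => it.1)).mem_iff.mp h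
  · intro k _
    apply pvContrib_perm
    exact (List.Perm.filter _ (PySem.List.sorted_perm floor (fun it => it.1) false)).symm

-- "".join(parts) is the left fold of ++
theorem pvJoinEmpty (parts : List String) :
    PySem.Str.join "" parts = parts.foldl (fun a b => a ++ b) "" := by
  have h1 : ∀ (ps : List (List Char)), List.intercalate [] ps = ps.flatten := by
    intro ps
    induction ps with
    | nil => simp [List.intercalate]
    | cons h t iht => cases t <;> simp_all [List.intercalate]
  have h2 : ∀ (ps : List String) (acc : String),
      ps.foldl (fun a b => a ++ b) acc = String.ofList (acc.toList ++ (ps.map String.toList).flatten) := by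
    intro ps
    induction ps with
    | nil => intro acc; simp
    | cons h t iht =>
      intro acc
      simp only [List.foldl_cons, iht, List.map_cons, List.flatten_cons]
      congr 1
      simp
  rw [h2]
  simp [PySem.Str.join, PySem.Chars.join, h1]

-- ===== VERDICT (by name: the statement is the Claim_ definition above) =====
theorem build_state_spec : Claim_equal_build_state := by
  intro floors _
  unfold Spec_build_state build_state build_state_alt
  rw [pvJoinEmpty, List.foldl_map]
  congr 1
  funext state floor
  show _ = state ++ (PySem.Str.join "," (PySem.List.sorted (pvRuns_build_state (PySem.List.sorted floor (fun it => it.1))) (fun x => x)) ++ ";")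
  rw [← pvFloorSortedEq floor, String.append_assoc]
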